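-- pv_equiv track=rewrite | github.com/Plorassi/competitive-coding-practise | Google/maximum-number-of-points-with-cost.py | maxPoints
-- ===== SOURCE A (Python) =====
-- from typing import List
--
-- def maxPoints(points: List[List[int]]) -> int:
--
--     dp = points[0]
--
--     for i in range(1,len(points)):
--         left, right = [], []
--
--         for j in range(len(points[0])):
--             if not left:
--                 left.append(dp[j])
--             else:
--                 left.append(max(dp[j], left[-1]-1))
--
--         for j in range(len(points[0]))[::-1]:
--             if not right:
--                 right.append(dp[j])
--             else:
--                 right.append(max(dp[j], right[-1]-1))
--
--         for j in range(len(dp)):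
--             dp[j] = max(left[j],right[len(dp)-j-1])+points[i][j]
--
--     return max(dp)
-- ===== SOURCE B (Python) =====
-- from typing import List
--
-- # Note: unlike A, B does not mutate points[0]; the equivalence claimed is about the return value.
-- def maxPoints(points: List[List[int]]) -> int:
--     dp = points[0]
--     n = len(dp)
--     for row in points[1:]:
--         dp = [row[j] + max(dp[k] - abs(j - k) for k in range(n)) for j in range(n)]
--     return max(dp)
-- ===== Notes on version B (the rewrite author's own statement) =====
-- stated objective: alternative
-- what changed: B replaces A's left/right running-max sweeps and in-place mutation of points[0] by the direct all-pairs DP newdp[j] = row[j] + max_k(dp[k] - |j-k|) over fresh rows; B does not mutate its argument (return value only is claimed equal).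
import Mathlib
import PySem

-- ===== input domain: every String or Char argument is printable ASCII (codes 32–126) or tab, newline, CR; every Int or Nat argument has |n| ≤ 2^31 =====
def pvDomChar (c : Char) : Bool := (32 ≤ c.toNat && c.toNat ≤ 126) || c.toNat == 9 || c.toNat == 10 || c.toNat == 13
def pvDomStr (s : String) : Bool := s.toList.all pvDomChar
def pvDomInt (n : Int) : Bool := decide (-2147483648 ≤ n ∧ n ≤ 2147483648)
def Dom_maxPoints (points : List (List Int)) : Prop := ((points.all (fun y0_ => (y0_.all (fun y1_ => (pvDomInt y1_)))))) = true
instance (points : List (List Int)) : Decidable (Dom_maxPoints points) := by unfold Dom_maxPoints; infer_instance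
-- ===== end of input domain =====

-- B replaces A's left/right running-max sweeps (and its in-place update of points[0]) by the direct
-- all-pairs DP newdp[j] = row[j] + max_k (dp[k] - |j-k|); B does not mutate its argument, so the
-- equivalence claimed here is about the return value only.

-- ===== PORT A =====
-- one append step of A's `left`/`right` building loops (`left.append(...)` branches)
def pvSweepStep (dp : List Int) (acc : List Int) (j : Int) : List Int :=
  if acc = [] then acc ++ [PySem.List.pyGetD dp j 0]
  else acc ++ [max (PySem.List.pyGetD dp j 0) (PySem.List.pyGetD acc (-1) 0 - 1)]

-- the body of A's `for i in range(1, len(points))` loop; since A's dp aliases points[0],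
-- len(points[0]) = len(dp) throughout, so the loop bounds are written dp.length.
def pvRowA (dp : List Int) (row : List Int) : List Int :=
  let left := (PySem.List.pyRange 0 (dp.length : Int) 1).foldl (pvSweepStep dp) []
  -- range(...)[::-1] is the reversed range (PySem.List.slice?_none_none_neg_one)
  let right := ((PySem.List.pyRange 0 (dp.length : Int) 1).reverse).foldl (pvSweepStep dp) []
  (PySem.List.pyRange 0 (dp.length : Int) 1).foldl
    (fun d j => PySem.List.pySetD d j
      (max (PySem.List.pyGetD left j 0)
           (PySem.List.pyGetD right ((d.length : Int) - j - 1) 0) + PySem.List.pyGetD row j 0)) dp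

def maxPoints (points : List (List Int)) : Int :=
  let dp0 := PySem.List.pyGetD points 0 []
  let dpF := (PySem.List.pyRange 1 (points.length : Int) 1).foldl
      (fun dp i => pvRowA dp (PySem.List.pyGetD points i [])) dp0
  (PySem.List.max? dpF (fun x => x)).getD 0

-- ===== PORT B =====
-- body of B's `for row in points[1:]` loop: the fresh all-pairs DP row
def pvRowB (n : Int) (dp row : List Int) : List Int :=
  (PySem.List.pyRange 0 n 1).map (fun j =>
    PySem.List.pyGetD row j 0 +
      ((PySem.List.max? ((PySem.List.pyRange 0 n 1).map
          (fun k => PySem.List.pyGetD dp k 0 - |j - k|)) (fun x => x)).getD 0))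

def maxPoints_alt (points : List (List Int)) : Int :=
  let dp0 := PySem.List.pyGetD points 0 []
  let n : Int := (dp0.length : Int)
  let dpF := (PySem.List.slice points (some 1) none).foldl (fun dp row => pvRowB n dp row) dp0
  (PySem.List.max? dpF (fun x => x)).getD 0

-- ===== PRECONDITION & SPEC =====
-- Pre_ excludes exactly the inputs on which the Python A raises: an empty points (IndexError on
-- points[0]), an empty first row (ValueError from max([])), and a later row shorter than the first
-- (IndexError on points[i][j]).
def Pre_maxPoints (points : List (List Int)) : Prop :=
  points ≠ [] ∧ points.headD [] ≠ [] ∧ ∀ r ∈ points, (points.headD []).length ≤ r.length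
instance (points : List (List Int)) : Decidable (Pre_maxPoints points) := by
  unfold Pre_maxPoints; infer_instance

def pvWitness_maxPoints : List (List Int) := [[1, 2, 3], [4, 0, 6]]

def Spec_maxPoints (points : List (List Int)) (out : Int) : Prop := out = maxPoints_alt points
instance (points : List (List Int)) (out : Int) : Decidable (Spec_maxPoints points out) := by
  unfold Spec_maxPoints; infer_instance

-- ===== CLAIM (what is proved, stated in full; the proofs are below) =====
def Claim_equal_maxPoints : Prop := ∀ (points : List (List Int)),
  Dom_maxPoints points → Pre_maxPoints points → Spec_maxPoints points (maxPoints points)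

-- ===== LEMMAS AND PROOFS =====

-- A's sweep lists, written as a structural scan
def pvScanTail (p : Int) : List Int → List Int
  | [] => []
  | v :: vs => max v (p - 1) :: pvScanTail (max v (p - 1)) vs

def pvScan1 : List Int → List Int
  | [] => []
  | v :: vs => v :: pvScanTail v vs

-- the value A's sweep holds at index j: max over k ≤ j of dp[k] - (j - k)
def pvBestL (vs : List Int) : Nat → Int
  | 0 => vs.getD 0 0
  | j + 1 => max (vs.getD (j + 1) 0) (pvBestL vs j - 1)

theorem pvBestL_cons (v : Int) (vs : List Int) (j : Nat) :
    pvBestL (v :: vs) (j + 1) = max (v - (j + 1)) (pvBestL vs j) := by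
  induction j with
  | zero => simp [pvBestL]; omega
  | succ j ih =>
      show max ((v :: vs).getD (j + 2) 0) (pvBestL (v :: vs) (j + 1) - 1) = _
      rw [ih]
      show max (vs.getD (j + 1) 0) _ = max (v - (↑j + 1 + 1)) (max (vs.getD (j + 1) 0) (pvBestL vs j - 1))
      omega

theorem pvScanTail_getD (vs : List Int) (p : Int) (j : Nat) (h : j < vs.length) :
    (pvScanTail p vs).getD j 0 = max (pvBestL vs j) (p - (j + 1)) := by
  induction vs generalizing p j with
  | nil => simp at h
  | cons v vs ih =>
      cases j with
      | zero => simp [pvScanTail, pvBestL]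
      | succ j =>
          have hj : j < vs.length := by simpa using h
          show (pvScanTail (max v (p - 1)) vs).getD j 0 = _
          rw [ih (max v (p - 1)) j hj, pvBestL_cons]
          push_cast
          omega

theorem pvScan1_getD (vs : List Int) (j : Nat) (h : j < vs.length) :
    (pvScan1 vs).getD j 0 = pvBestL vs j := by
  cases vs with
  | nil => simp at h
  | cons v vs =>
      cases j with
      | zero => simp [pvScan1, pvBestL]
      | succ j =>
          have hj : j < vs.length := by simpa using h
          show (pvScanTail v vs).getD j 0 = _
          rw [pvScanTail_getD vs v j hj, pvBestL_cons]
          omega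

-- A's append loop equals the structural scan of the read values
theorem pvSweep_tail (dp : List Int) :
    ∀ (l : List Int) (acc : List Int) (p : Int), acc ≠ [] → PySem.List.pyGetD acc (-1) 0 = p →
      l.foldl (pvSweepStep dp) acc = acc ++ pvScanTail p (l.map (fun j => PySem.List.pyGetD dp j 0)) := by
  intro l
  induction l with
  | nil => intro acc p _ _; simp [pvScanTail]
  | cons j l ih =>
      intro acc p hne hlast
      have hstep : pvSweepStep dp acc j
          = acc ++ [max (PySem.List.pyGetD dp j 0) (p - 1)] := by
        simp [pvSweepStep, hne, hlast]
      rw [List.foldl_cons, hstep,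
        ih (acc ++ [max (PySem.List.pyGetD dp j 0) (p - 1)]) (max (PySem.List.pyGetD dp j 0) (p - 1))
          (by simp) (PySem.List.pyGetD_neg_one_append_singleton acc _ 0)]
      simp [pvScanTail]

theorem pvSweep_eq_scan1 (dp : List Int) (l : List Int) :
    l.foldl (pvSweepStep dp) [] = pvScan1 (l.map (fun j => PySem.List.pyGetD dp j 0)) := by
  cases l with
  | nil => rfl
  | cons j l =>
      have h0 : pvSweepStep dp [] j = [PySem.List.pyGetD dp j 0] := by simp [pvSweepStep]
      rw [List.foldl_cons, h0,
        pvSweep_tail dp l [PySem.List.pyGetD dp j 0] (PySem.List.pyGetD dp j 0) (by simp)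
          (by simpa using PySem.List.pyGetD_neg_one_append_singleton ([] : List Int) (PySem.List.pyGetD dp j 0) 0)]
      simp [pvScan1]

-- pvBestL is the max over the left cone, attained
theorem pvBestL_ub (dp : List Int) (j : Nat) :
    ∀ k ≤ j, dp.getD k 0 - ((j : Int) - k) ≤ pvBestL dp j := by
  induction j with
  | zero => intro k hk; interval_cases k; simp [pvBestL]
  | succ j ih =>
      intro k hk
      rcases Nat.lt_or_ge k (j + 1) with h | h
      · have := ih k (by omega)
        show _ ≤ max (dp.getD (j + 1) 0) (pvBestL dp j - 1)
        push_cast at this ⊢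
        omega
      · have hk1 : k = j + 1 := by omega
        subst hk1
        show _ ≤ max (dp.getD (j + 1) 0) (pvBestL dp j - 1)
        omega

theorem pvBestL_mem (dp : List Int) (j : Nat) :
    ∃ k ≤ j, pvBestL dp j = dp.getD k 0 - ((j : Int) - k) := by
  induction j with
  | zero => exact ⟨0, le_refl 0, by simp [pvBestL]⟩
  | succ j ih =>
      rcases ih with ⟨k, hk, hval⟩
      rcases le_total (dp.getD (j + 1) 0) (pvBestL dp j - 1) with h | h
      · refine ⟨k, by omega, ?_⟩
        show max (dp.getD (j + 1) 0) (pvBestL dp j - 1) = _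
        push_cast
        omega
      · refine ⟨j + 1, le_refl _, ?_⟩
        show max (dp.getD (j + 1) 0) (pvBestL dp j - 1) = _
        push_cast
        omega

theorem pvGetD_reverse (dp : List Int) (i : Nat) (h : i < dp.length) :
    dp.reverse.getD i 0 = dp.getD (dp.length - 1 - i) 0 := by
  rw [List.getD_eq_getElem dp.reverse 0 (by simpa using h),
    List.getD_eq_getElem dp 0 (by omega), List.getElem_reverse]

-- upper bound / attainment for the right cone, via the reversed sweep
theorem pvBestR_ub (dp : List Int) (j : Nat) (hj : j < dp.length) :
    ∀ t, j ≤ t → t < dp.length → dp.getD t 0 - ((t : Int) - j) ≤ pvBestL dp.reverse (dp.length - 1 - j) := by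
  intro t hjt ht
  have hub := pvBestL_ub dp.reverse (dp.length - 1 - j) (dp.length - 1 - t) (by omega)
  rw [pvGetD_reverse dp (dp.length - 1 - t) (by omega)] at hub
  have he : dp.length - 1 - (dp.length - 1 - t) = t := by omega
  rw [he] at hub
  have : ((dp.length - 1 - j : Nat) : Int) - ((dp.length - 1 - t : Nat) : Int) = (t : Int) - j := by
    omega
  omega

theorem pvBestR_mem (dp : List Int) (j : Nat) (hj : j < dp.length) :
    ∃ t, j ≤ t ∧ t < dp.length ∧ pvBestL dp.reverse (dp.length - 1 - j) = dp.getD t 0 - ((t : Int) - j) := by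
  rcases pvBestL_mem dp.reverse (dp.length - 1 - j) with ⟨k, hk, hval⟩
  refine ⟨dp.length - 1 - k, by omega, by omega, ?_⟩
  rw [pvGetD_reverse dp k (by omega)] at hval
  have : ((dp.length - 1 - j : Nat) : Int) - (k : Int) = ((dp.length - 1 - k : Nat) : Int) - (j : Int) := by
    omega
  omega

-- the all-pairs max of B equals the two directional sweep maxima of A
theorem pvCombine (dp : List Int) (j : Nat) (hj : j < dp.length) :
    ((PySem.List.max? ((List.range dp.length).map
        (fun k => dp.getD k 0 - |(j : Int) - (k : Int)|)) (fun x => x)).getD 0)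
      = max (pvBestL dp j) (pvBestL dp.reverse (dp.length - 1 - j)) := by
  set f : Nat → Int := fun k => dp.getD k 0 - |(j : Int) - (k : Int)| with hf
  set L := (List.range dp.length).map f with hL
  have hLne : L ≠ [] := by
    simp only [hL, ne_eq, List.map_eq_nil_iff, List.range_eq_nil]
    omega
  obtain ⟨m, hm⟩ : ∃ m, PySem.List.max? L (fun x => x) = some m := by
    rcases h : PySem.List.max? L (fun x => x) with _ | m
    · exact absurd ((PySem.List.max?_eq_none_iff L (fun x => x)).mp h) hLne
    · exact ⟨m, rfl⟩
  have hmem := PySem.List.max?_mem hm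
  have hmax := PySem.List.max?_isMax hm
  rw [hm]
  simp only [Option.getD_some]
  apply le_antisymm
  · -- m is one of the f t, each of which is below one of the cones
    rcases List.mem_map.mp (hL ▸ hmem) with ⟨t, htr, hft⟩
    have ht : t < dp.length := List.mem_range.mp htr
    rcases Nat.lt_or_ge j t with h | h
    · have := pvBestR_ub dp j hj t (by omega) ht
      have habs : |(j : Int) - (t : Int)| = (t : Int) - j := by
        rw [abs_sub_comm]; exact abs_of_nonneg (by omega)
      rw [← hft, hf]
      simp only
      rw [habs]
      omega
    · have := pvBestL_ub dp j t h
      have habs : |(j : Int) - (t : Int)| = (j : Int) - t := abs_of_nonneg (by omega)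
      rw [← hft, hf]
      simp only
      rw [habs]
      omega
  · -- both cone maxima are elements of L, hence ≤ m
    rcases pvBestL_mem dp j with ⟨k, hk, hvk⟩
    rcases pvBestR_mem dp j hj with ⟨t, hjt, ht, hvt⟩
    have hkL : f k ∈ L := by
      rw [hL]; exact List.mem_map_of_mem (List.mem_range.mpr (by omega))
    have htL : f t ∈ L := by
      rw [hL]; exact List.mem_map_of_mem (List.mem_range.mpr ht)
    have h1 := hmax (f k) hkL
    have h2 := hmax (f t) htL
    have habsk : |(j : Int) - (k : Int)| = (j : Int) - k := abs_of_nonneg (by omega)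
    have habst : |(j : Int) - (t : Int)| = (t : Int) - j := by
      rw [abs_sub_comm]; exact abs_of_nonneg (by omega)
    simp only [hf] at h1 h2
    rw [habsk] at h1
    rw [habst] at h2
    omega

-- the assigned value does not depend on the evolving list (its length is invariant)
theorem pvFoldl_pySetD_congr (l : List Int) :
    ∀ (d : List Int) (g : List Int → Int → Int) (G : Int → Int),
      (∀ (d' : List Int) (j : Int), d'.length = d.length → g d' j = G j) →
      l.foldl (fun d j => PySem.List.pySetD d j (g d j)) d
        = l.foldl (fun d j => PySem.List.pySetD d j (G j)) d := by
  induction l with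
  | nil => intro d g G _; rfl
  | cons j l ih =>
      intro d g G hg
      simp only [List.foldl_cons, hg d j rfl]
      exact ih (PySem.List.pySetD d j (G j)) g G
        (fun d' j' h => hg d' j' (by simpa [PySem.List.length_pySetD] using h))

-- writing G j to every index j in order rebuilds the list as a map
theorem pvFoldl_pySetD_range (n : Nat) : ∀ (m : Nat) (d : List Int) (G : Int → Int),
    d.length = n → m ≤ n →
    (PySem.List.pyRange (m : Int) (n : Int) 1).foldl
        (fun d j => PySem.List.pySetD d j (G j)) d
      = d.take m ++ (List.range (n - m)).map (fun t => G ((m + t : Nat) : Int)) := by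
  intro m
  induction hk : n - m generalizing m with
  | zero =>
      intro d G hd hm
      have hnm : n = m := by omega
      subst hnm
      rw [PySem.List.pyRange_one_eq_nil (le_refl _)]
      simp only [List.foldl_nil, List.range_zero, List.map_nil, List.append_nil]
      exact (List.take_of_length_le hd.le).symm
  | succ k ih =>
      intro d G hd hm
      have hlt : m < n := by omega
      rw [PySem.List.pyRange_one_cons (by exact_mod_cast hlt), List.foldl_cons]
      have hcast : ((m : Int) + 1) = ((m + 1 : Nat) : Int) := by push_cast; ring
      rw [hcast]
      rw [ih (m + 1) (by omega) (PySem.List.pySetD d (m : Int) (G m)) G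
        (by simp [hd]) (by omega)]
      rw [PySem.List.pySetD_natCast]
      have htake : (d.set m (G m)).take (m + 1) = d.take m ++ [G (m : Int)] := by
        rw [List.take_add_one]
        congr 1
        · exact List.take_set_of_le (le_refl m)
        · rw [List.getElem?_set_self (by omega)]
          rfl
      rw [htake, List.append_assoc]
      congr 1
      rw [List.range_succ_eq_map]
      simp only [List.map_cons, List.map_map, List.singleton_append, Nat.add_zero]
      congr 1
      apply List.map_congr_left
      intro t _
      simp only [Function.comp_apply]
      congr 2
      omega

-- per-row equality: A's sweep row equals B's all-pairs row
theorem pvRow_eq (dp row : List Int) : pvRowA dp row = pvRowB (dp.length : Int) dp row := by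
  have hleft : (PySem.List.pyRange 0 (dp.length : Int) 1).foldl (pvSweepStep dp) [] = pvScan1 dp := by
    rw [pvSweep_eq_scan1]
    exact congrArg pvScan1 (PySem.List.map_pyGetD_pyRange_zero' dp 0)
  have hright : ((PySem.List.pyRange 0 (dp.length : Int) 1).reverse).foldl (pvSweepStep dp) []
      = pvScan1 dp.reverse := by
    rw [pvSweep_eq_scan1, List.map_reverse]
    exact congrArg (fun l => pvScan1 l.reverse) (PySem.List.map_pyGetD_pyRange_zero' dp 0)
  set G : Int → Int := fun j =>
    max (PySem.List.pyGetD (pvScan1 dp) j 0)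
        (PySem.List.pyGetD (pvScan1 dp.reverse) ((dp.length : Int) - j - 1) 0)
      + PySem.List.pyGetD row j 0 with hG
  have hA : pvRowA dp row = (List.range dp.length).map (fun t => G ((t : Nat) : Int)) := by
    have h1 : pvRowA dp row
        = (PySem.List.pyRange 0 (dp.length : Int) 1).foldl
            (fun d j => PySem.List.pySetD d j (G j)) dp := by
      simp only [pvRowA]
      rw [hleft, hright]
      exact pvFoldl_pySetD_congr _ dp
        (fun d j => max (PySem.List.pyGetD (pvScan1 dp) j 0)
          (PySem.List.pyGetD (pvScan1 dp.reverse) ((d.length : Int) - j - 1) 0)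
          + PySem.List.pyGetD row j 0) G
        (fun d' j h => by rw [hG]; simp only; rw [h])
    rw [h1]
    have h2 := pvFoldl_pySetD_range dp.length 0 dp G rfl (Nat.zero_le _)
    simpa using h2
  rw [hA]
  simp only [pvRowB]
  rw [PySem.List.pyRange_one]
  simp only [sub_zero, Int.toNat_natCast, List.map_map]
  apply List.map_congr_left
  intro t htr
  have ht : t < dp.length := List.mem_range.mp htr
  simp only [Function.comp_apply, zero_add]
  rw [hG]
  simp only [PySem.List.pyGetD_natCast]
  rw [pvScan1_getD dp t ht]
  have hidx : (dp.length : Int) - (t : Int) - 1 = ((dp.length - 1 - t : Nat) : Int) := by omega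
  rw [hidx, PySem.List.pyGetD_natCast,
    pvScan1_getD dp.reverse (dp.length - 1 - t) (by simp only [List.length_reverse]; omega)]
  have hinner : (List.range dp.length).map
        ((fun k => PySem.List.pyGetD dp k 0 - |(t : Int) - k|) ∘ (fun k : Nat => (k : Int)))
      = (List.range dp.length).map (fun k : Nat => dp.getD k 0 - |(t : Int) - (k : Int)|) := by
    apply List.map_congr_left
    intro k _
    simp [PySem.List.pyGetD_natCast]
  rw [hinner, pvCombine dp t ht]
  omega

theorem pvRowB_length (n : Nat) (dp row : List Int) :
    (pvRowB (n : Int) dp row).length = n := by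
  unfold pvRowB
  rw [List.length_map, PySem.List.length_pyRange_one]
  omega

theorem pvFold_rows_eq (n : Nat) :
    ∀ (rest : List (List Int)) (dp : List Int), dp.length = n →
      rest.foldl pvRowA dp = rest.foldl (fun dp row => pvRowB (n : Int) dp row) dp := by
  intro rest
  induction rest with
  | nil => intro dp _; rfl
  | cons row rest ih =>
      intro dp hd
      simp only [List.foldl_cons]
      rw [pvRow_eq dp row, hd]
      exact ih (pvRowB (n : Int) dp row) (pvRowB_length n dp row)

-- ===== VERDICT (by name: the statement is the Claim_ definition above) =====
theorem maxPoints_spec : Claim_equal_maxPoints := by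
  intro points _ _
  unfold Spec_maxPoints maxPoints maxPoints_alt
  simp only
  congr 1
  rw [PySem.List.slice_from_one, ← List.drop_one,
    PySem.List.foldl_pyRange_pyGetD' points ([] : List Int) pvRowA
      (PySem.List.pyGetD points 0 []) (by norm_num : (0 : Int) ≤ 1)]
  rw [show ((1 : Int).toNat) = 1 from rfl]
  exact congrArg (fun l => PySem.List.max? l (fun x => x))
    (pvFold_rows_eq (PySem.List.pyGetD points 0 []).length (points.drop 1)
      (PySem.List.pyGetD points 0 []) rfl)
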